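-- pv_equiv track=rewrite | github.com/rstanleyc/progra-python | repaso-c1/clase2/tests/ej2.py | mejor
-- ===== SOURCE A (Python) =====
-- def mejor(votos):
--     vot = str(votos)
--     final = 'ABCD'
--     mayor = -1
--     i = 0
--     for v in vot:
--         if int(v) > mayor:
--             mayor = int(v)
--             pos_mayor = i
--         i += 1
--     if mayor < 4:
--         return ''
--     return final[pos_mayor]
-- ===== SOURCE B (Python) =====
-- def mejor(votos):
--     s = str(votos)
--     mayor = max(int(d) for d in s)
--     if mayor < 4:
--         return ''
--     return 'ABCD'[s.find(str(mayor))]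
-- ===== Notes on version B (the rewrite author's own statement) =====
-- stated objective: idiomatic
-- what changed: A's single fused scan that tracks a running max, its position and a manual index counter is replaced by a two-pass aggregate-then-locate decomposition: max() over the digits, then find() of the first occurrence of the max digit.
import Mathlib
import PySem

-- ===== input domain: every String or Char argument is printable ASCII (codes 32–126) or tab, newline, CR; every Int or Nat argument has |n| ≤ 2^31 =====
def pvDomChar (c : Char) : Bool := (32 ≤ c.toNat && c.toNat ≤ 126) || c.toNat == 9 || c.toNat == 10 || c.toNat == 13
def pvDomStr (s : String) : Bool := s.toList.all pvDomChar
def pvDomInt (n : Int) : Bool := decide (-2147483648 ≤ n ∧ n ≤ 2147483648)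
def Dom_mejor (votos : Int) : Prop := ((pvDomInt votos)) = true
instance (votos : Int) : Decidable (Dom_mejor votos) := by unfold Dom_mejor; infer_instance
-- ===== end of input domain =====

-- B replaces A's fused running-max scan (explicit index bookkeeping) with a two-pass
-- aggregate-then-locate decomposition: max() over the digits, then find() of the first
-- occurrence of the max digit.  Objective: idiomatic; same return value on Pre_.

-- ===== PORT A =====
def mejor (votos : Int) : String :=
  let vot := PySem.Int.toChars votos
  let final := "ABCD"
  let st := vot.foldl (fun (acc : Int × Int × Int) v =>
      -- int(v): ValueError (= none) only for the '-' of a negative votos, excluded by Pre_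
      if (PySem.Int.ofChars? [v]).getD 0 > acc.1 then
        ((PySem.Int.ofChars? [v]).getD 0, acc.2.2, acc.2.2 + 1)
      else (acc.1, acc.2.1, acc.2.2 + 1))
    (-1, 0, 0)
  if st.1 < 4 then ""
  else
    match PySem.Str.pyGet? final st.2.1 with
    | some c => String.ofList [c]
    | none => ""   -- IndexError in Python; excluded by Pre_mejor

-- ===== PORT B =====
def mejor_alt (votos : Int) : String :=
  let s := PySem.Int.toChars votos
  let mayor := (PySem.List.max? (s.map (fun d => (PySem.Int.ofChars? [d]).getD 0)) (fun x => x)).getD 0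
  if mayor < 4 then ""
  else
    match PySem.Str.pyGet? "ABCD" (PySem.Chars.find s (PySem.Int.toChars mayor)) with
    | some c => String.ofList [c]
    | none => ""   -- IndexError in Python; excluded by Pre_mejor

-- ===== PRECONDITION & SPEC =====
-- Pre_ excludes exactly the inputs where A raises: negative votos (int('-') is a ValueError)
-- and numbers whose maximal digit is ≥ 4 but first occurs at digit position ≥ 4
-- ('ABCD'[pos_mayor] is an IndexError; max digit among the first 4 digits ↔ its first
-- occurrence index is < 4).
def Pre_mejor (votos : Int) : Prop :=
  0 ≤ votos ∧
  (((PySem.Int.toChars votos).map (fun c => (c.toNat : Int) - 48)).foldl max (-1) < 4 ∨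
   ((PySem.Int.toChars votos).map (fun c => (c.toNat : Int) - 48)).foldl max (-1) ∈
     ((PySem.Int.toChars votos).map (fun c => (c.toNat : Int) - 48)).take 4)
instance (votos : Int) : Decidable (Pre_mejor votos) := by unfold Pre_mejor; infer_instance
def pvWitness_mejor : Int := (91)

def Spec_mejor (votos : Int) (out : String) : Prop := out = mejor_alt votos
instance (votos : Int) (out : String) : Decidable (Spec_mejor votos out) := by unfold Spec_mejor; infer_instance

-- ===== CLAIM (what is proved, stated in full; the proofs are below) =====
def Claim_equal_mejor : Prop := ∀ (votos : Int), Dom_mejor votos → Pre_mejor votos → Spec_mejor votos (mejor votos)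

-- ===== LEMMAS AND PROOFS =====

-- digit value of a char, the common currency of both proofs
def pvDig (c : Char) : Int := (c.toNat : Int) - 48

-- A's loop body on already-decoded digits
def pvStep (acc : Int × Int × Int) (d : Int) : Int × Int × Int :=
  if d > acc.1 then (d, acc.2.2, acc.2.2 + 1) else (acc.1, acc.2.1, acc.2.2 + 1)

lemma pvStep_def (m p i d : Int) :
    pvStep (m, p, i) d = if d > m then (d, i, i + 1) else (m, p, i + 1) := rfl

lemma pv_digitChar_toNat (m : Nat) (h : m < 10) : (Nat.digitChar m).toNat = m + 48 := by
  interval_cases m <;> decide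

lemma pv_toDigitsCore_mem (fuel : Nat) : ∀ (n : Nat) (ds : List Char) (c : Char),
    c ∈ Nat.toDigitsCore 10 fuel n ds → c ∈ ds ∨ (48 ≤ c.toNat ∧ c.toNat ≤ 57) := by
  induction fuel with
  | zero => intro n ds c hc; exact Or.inl hc
  | succ fuel ih =>
    intro n ds c hc
    rw [Nat.toDigitsCore] at hc
    have hd : 48 ≤ (Nat.digitChar (n % 10)).toNat ∧ (Nat.digitChar (n % 10)).toNat ≤ 57 := by
      rw [pv_digitChar_toNat (n % 10) (Nat.mod_lt _ (by norm_num))]; omega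
    split at hc
    · rw [List.mem_cons] at hc
      rcases hc with rfl | h
      · exact Or.inr hd
      · exact Or.inl h
    · rcases ih (n / 10) _ c hc with h | h
      · rw [List.mem_cons] at h
        rcases h with rfl | h
        · exact Or.inr hd
        · exact Or.inl h
      · exact Or.inr h

lemma pv_toDigitsCore_ne_nil (fuel : Nat) : ∀ (n : Nat) (ds : List Char),
    Nat.toDigitsCore 10 (fuel + 1) n ds ≠ [] := by
  induction fuel with
  | zero => intro n ds; rw [Nat.toDigitsCore]; split <;> simp [Nat.toDigitsCore]
  | succ fuel ih =>
    intro n ds; rw [Nat.toDigitsCore]; split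
    · simp
    · exact ih (n / 10) _

lemma pv_toChars_nonneg (votos : Int) (h : 0 ≤ votos) :
    PySem.Int.toChars votos = Nat.toDigits 10 votos.toNat := by
  simp [PySem.Int.toChars, not_lt.mpr h]

lemma pv_toChars_digits (votos : Int) (h : 0 ≤ votos) :
    ∀ c ∈ PySem.Int.toChars votos, 48 ≤ c.toNat ∧ c.toNat ≤ 57 := by
  intro c hc
  rw [pv_toChars_nonneg votos h] at hc
  rcases pv_toDigitsCore_mem _ _ _ _ hc with h | h
  · simp at h
  · exact h

lemma pv_toChars_ne_nil (votos : Int) (h : 0 ≤ votos) :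
    PySem.Int.toChars votos ≠ [] := by
  rw [pv_toChars_nonneg votos h]
  exact pv_toDigitsCore_ne_nil _ _ _

lemma pv_char_eq_of_toNat (a b : Char) (h : a.toNat = b.toNat) : a = b :=
  Char.ext (UInt32.toNat_inj.mp h)

lemma pv_decode (c : Char) (h1 : 48 ≤ c.toNat) (h2 : c.toNat ≤ 57) :
    (PySem.Int.ofChars? [c]).getD 0 = pvDig c := by
  have h48 : c.toNat = 48 ∨ c.toNat = 49 ∨ c.toNat = 50 ∨ c.toNat = 51 ∨ c.toNat = 52 ∨
      c.toNat = 53 ∨ c.toNat = 54 ∨ c.toNat = 55 ∨ c.toNat = 56 ∨ c.toNat = 57 := by omega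
  rcases h48 with h | h | h | h | h | h | h | h | h | h
  · rw [pv_char_eq_of_toNat c '0' (by rw [h]; decide)]; decide
  · rw [pv_char_eq_of_toNat c '1' (by rw [h]; decide)]; decide
  · rw [pv_char_eq_of_toNat c '2' (by rw [h]; decide)]; decide
  · rw [pv_char_eq_of_toNat c '3' (by rw [h]; decide)]; decide
  · rw [pv_char_eq_of_toNat c '4' (by rw [h]; decide)]; decide
  · rw [pv_char_eq_of_toNat c '5' (by rw [h]; decide)]; decide
  · rw [pv_char_eq_of_toNat c '6' (by rw [h]; decide)]; decide
  · rw [pv_char_eq_of_toNat c '7' (by rw [h]; decide)]; decide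
  · rw [pv_char_eq_of_toNat c '8' (by rw [h]; decide)]; decide
  · rw [pv_char_eq_of_toNat c '9' (by rw [h]; decide)]; decide

lemma pv_toChars_small (M : Int) (h0 : 0 ≤ M) (h9 : M ≤ 9) :
    PySem.Int.toChars M = [Nat.digitChar M.toNat] := by
  rw [pv_toChars_nonneg M h0]
  have hm : M.toNat < 10 := by omega
  show Nat.toDigitsCore 10 (M.toNat + 1) M.toNat [] = _
  rw [Nat.toDigitsCore]
  rw [if_pos (by omega), Nat.mod_eq_of_lt hm]

lemma pv_foldl_max_of_le (l : List Int) : ∀ (m : Int), (∀ x ∈ l, x ≤ m) → l.foldl max m = m := by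
  induction l with
  | nil => intro m _; rfl
  | cons d t ih =>
    intro m h
    have hd : d ≤ m := h d (List.mem_cons_self ..)
    rw [List.foldl_cons, max_eq_left hd]
    exact ih m (fun x hx => h x (List.mem_cons_of_mem _ hx))

lemma pv_foldl_max_mem (l : List Int) : ∀ (m : Int), l.foldl max m ∈ m :: l := by
  induction l with
  | nil => intro m; simp
  | cons d t ih =>
    intro m
    rw [List.foldl_cons]
    have h := ih (max m d)
    rw [List.mem_cons] at h
    rcases h with h | h
    · rw [h]
      rcases max_choice m d with hc | hc <;> rw [hc] <;> simp
    · simp [h]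

lemma pv_L1 (l : List Int) : ∀ (m p i : Int), (l.foldl pvStep (m, p, i)).1 = l.foldl max m := by
  induction l with
  | nil => intro m p i; rfl
  | cons d t ih =>
    intro m p i
    rw [List.foldl_cons, List.foldl_cons, pvStep_def]
    by_cases h : d > m
    · rw [if_pos h, max_eq_right (le_of_lt h)]; exact ih _ _ _
    · rw [if_neg h, max_eq_left (not_lt.mp h)]; exact ih _ _ _

lemma pv_L2a (l : List Int) : ∀ (m p i : Int), (∀ x ∈ l, x ≤ m) →
    (l.foldl pvStep (m, p, i)).2.1 = p := by
  induction l with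
  | nil => intro m p i _; rfl
  | cons d t ih =>
    intro m p i h
    rw [List.foldl_cons, pvStep_def, if_neg (not_lt.mpr (h d (List.mem_cons_self ..)))]
    exact ih _ _ _ (fun x hx => h x (List.mem_cons_of_mem _ hx))

lemma pv_L2b (l : List Int) : ∀ (m p i : Int), (∃ x ∈ l, m < x) →
    (l.foldl pvStep (m, p, i)).2.1 = i + (List.idxOf (l.foldl max m) l : Int) := by
  induction l with
  | nil => intro m p i h; simp at h
  | cons d t ih =>
    intro m p i h
    rw [List.foldl_cons, List.foldl_cons, pvStep_def]
    by_cases hd : d > m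
    · rw [if_pos hd, max_eq_right (le_of_lt hd)]
      by_cases ht : ∃ x ∈ t, d < x
      · have hM : d < t.foldl max d := by
          obtain ⟨x, hx, hdx⟩ := ht
          exact lt_of_lt_of_le hdx ((PySem.List.le_foldl_max t d).2 x hx)
        rw [ih d i (i + 1) ht, List.idxOf_cons_ne _ (by omega : d ≠ t.foldl max d)]
        push_cast [Nat.succ_eq_add_one]; ring
      · have ht' : ∀ x ∈ t, x ≤ d := fun x hx => not_lt.mp (fun hlt => ht ⟨x, hx, hlt⟩)
        rw [pv_L2a t d i (i + 1) ht', pv_foldl_max_of_le t d ht', List.idxOf_cons_self]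
        simp
    · rw [if_neg hd, max_eq_left (not_lt.mp hd)]
      have ht : ∃ x ∈ t, m < x := by
        obtain ⟨x, hx, hmx⟩ := h
        rw [List.mem_cons] at hx
        rcases hx with rfl | hx
        · omega
        · exact ⟨x, hx, hmx⟩
      have hM : m < t.foldl max m := by
        obtain ⟨x, hx, hmx⟩ := ht
        exact lt_of_lt_of_le hmx ((PySem.List.le_foldl_max t m).2 x hx)
      rw [ih m p (i + 1) ht, List.idxOf_cons_ne _ (by omega : d ≠ t.foldl max m)]
      push_cast [Nat.succ_eq_add_one]; ring

lemma pv_idxOf_eq_of (c : Char) : ∀ (s : List Char) (k : Nat), k < s.length →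
    s[k]? = some c → (∀ j, j < k → s[j]? ≠ some c) → List.idxOf c s = k := by
  intro s
  induction s with
  | nil => intro k hk _ _; simp at hk
  | cons a t ih =>
    intro k hk h1 h2
    cases k with
    | zero =>
      simp at h1
      rw [h1, List.idxOf_cons_self]
    | succ k =>
      have ha : a ≠ c := by
        intro hac
        exact h2 0 (Nat.succ_pos k) (by simp [hac])
      rw [List.idxOf_cons_ne _ ha]
      simp only [List.length_cons] at hk
      rw [ih k (by omega) (by simpa using h1)
        (fun j hj => by simpa using h2 (j + 1) (by omega))]

lemma pv_singleton_prefix (c : Char) (l : List Char) : [c] <+: l ↔ l.head? = some c := by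
  constructor
  · rintro ⟨t, rfl⟩; rfl
  · intro h
    cases l with
    | nil => simp at h
    | cons a t =>
      simp at h
      exact ⟨t, by simp [h]⟩

lemma pv_find_singleton (s : List Char) (c : Char) (hc : c ∈ s) :
    PySem.Chars.find s [c] = (List.idxOf c s : Int) := by
  have hinf : [c] <:+: s := by
    obtain ⟨l1, l2, rfl⟩ := List.append_of_mem hc
    exact ⟨l1, l2, by simp⟩
  have h0 : 0 ≤ PySem.Chars.find s [c] := (PySem.Chars.find_nonneg_iff s [c]).mpr hinf
  obtain ⟨hpre, hmin⟩ := PySem.Chars.find_spec h0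
  rw [pv_singleton_prefix, List.head?_drop] at hpre
  have hlt : (PySem.Chars.find s [c]).toNat < s.length := by
    by_contra hge
    rw [List.getElem?_eq_none (by omega)] at hpre
    simp at hpre
  rw [pv_idxOf_eq_of c s (PySem.Chars.find s [c]).toNat hlt hpre
    (fun j hj hcj => hmin j (by omega) ((pv_singleton_prefix c _).mpr (by rwa [List.head?_drop])))]
  omega

lemma pv_idxOf_map (c : Char) (h1 : 48 ≤ c.toNat) (h2 : c.toNat ≤ 57) :
    ∀ (s : List Char), (∀ a ∈ s, 48 ≤ a.toNat ∧ a.toNat ≤ 57) →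
    List.idxOf (pvDig c) (s.map pvDig) = List.idxOf c s := by
  intro s
  induction s with
  | nil => intro _; rfl
  | cons a t ih =>
    intro h
    by_cases hac : a = c
    · subst hac; simp [List.idxOf_cons_self]
    · have hda : pvDig a ≠ pvDig c := by
        intro hd
        have : a.toNat = c.toNat := by unfold pvDig at hd; omega
        exact hac (pv_char_eq_of_toNat a c this)
      rw [List.map_cons, List.idxOf_cons_ne _ hda, List.idxOf_cons_ne _ hac,
        ih (fun x hx => h x (List.mem_cons_of_mem _ hx))]

lemma pv_dig_digitChar (M : Int) (h0 : 0 ≤ M) (h9 : M ≤ 9) :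
    pvDig (Nat.digitChar M.toNat) = M := by
  show ((Nat.digitChar M.toNat).toNat : Int) - 48 = M
  rw [pv_digitChar_toNat M.toNat (by omega)]
  omega

-- the whole equivalence, over an abstract non-empty list of digit characters
lemma pv_main (c0 : Char) (t0 : List Char)
    (hdigs : ∀ c ∈ c0 :: t0, 48 ≤ c.toNat ∧ c.toNat ≤ 57) :
    (if ((c0 :: t0).foldl (fun (acc : Int × Int × Int) v =>
        if (PySem.Int.ofChars? [v]).getD 0 > acc.1 then
          ((PySem.Int.ofChars? [v]).getD 0, acc.2.2, acc.2.2 + 1)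
        else (acc.1, acc.2.1, acc.2.2 + 1)) (-1, 0, 0)).1 < 4 then ""
     else
       match PySem.Str.pyGet? "ABCD" ((c0 :: t0).foldl (fun (acc : Int × Int × Int) v =>
          if (PySem.Int.ofChars? [v]).getD 0 > acc.1 then
            ((PySem.Int.ofChars? [v]).getD 0, acc.2.2, acc.2.2 + 1)
          else (acc.1, acc.2.1, acc.2.2 + 1)) (-1, 0, 0)).2.1 with
       | some c => String.ofList [c]
       | none => "") =
    (if ((PySem.List.max? ((c0 :: t0).map (fun d => (PySem.Int.ofChars? [d]).getD 0)) (fun x => x)).getD 0) < 4 then ""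
     else
       match PySem.Str.pyGet? "ABCD" (PySem.Chars.find (c0 :: t0)
          (PySem.Int.toChars ((PySem.List.max? ((c0 :: t0).map (fun d => (PySem.Int.ofChars? [d]).getD 0)) (fun x => x)).getD 0))) with
       | some c => String.ofList [c]
       | none => "") := by
  have hdec : ∀ c ∈ c0 :: t0, (PySem.Int.ofChars? [c]).getD 0 = pvDig c := fun c hc =>
    pv_decode c (hdigs c hc).1 (hdigs c hc).2
  have hd0 : 0 ≤ pvDig c0 := by
    have := (hdigs c0 (List.mem_cons_self ..)).1
    unfold pvDig; omega
  -- A's char fold is the digit fold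
  have hfoldA : (c0 :: t0).foldl (fun (acc : Int × Int × Int) v =>
      if (PySem.Int.ofChars? [v]).getD 0 > acc.1 then
        ((PySem.Int.ofChars? [v]).getD 0, acc.2.2, acc.2.2 + 1)
      else (acc.1, acc.2.1, acc.2.2 + 1)) (-1, 0, 0)
      = ((c0 :: t0).map pvDig).foldl pvStep (-1, 0, 0) := by
    rw [List.foldl_map]
    exact PySem.List.foldl_congr_mem _ _ _ _ (fun acc c hc => by
      rw [pvStep, hdec c hc])
  -- the max digit
  have hfmax : ((c0 :: t0).map pvDig).foldl max (-1) = (t0.map pvDig).foldl max (pvDig c0) := by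
    rw [List.map_cons, List.foldl_cons, max_eq_right (by omega : (-1 : Int) ≤ pvDig c0)]
  have hMmem : (t0.map pvDig).foldl max (pvDig c0) ∈ (c0 :: t0).map pvDig := by
    rw [List.map_cons]
    exact pv_foldl_max_mem (t0.map pvDig) (pvDig c0)
  have hMb : 0 ≤ (t0.map pvDig).foldl max (pvDig c0) ∧ (t0.map pvDig).foldl max (pvDig c0) ≤ 9 := by
    obtain ⟨c, hc, hcM⟩ := List.mem_map.mp hMmem
    have hcd := hdigs c hc
    have hcM' : (c.toNat : Int) - 48 = (t0.map pvDig).foldl max (pvDig c0) := hcM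
    omega
  generalize hMg : (t0.map pvDig).foldl max (pvDig c0) = M at hfmax hMmem hMb
  -- B's mayor equals the fold max
  have hmayor : (PySem.List.max? ((c0 :: t0).map (fun d => (PySem.Int.ofChars? [d]).getD 0)) (fun x => x)).getD 0
      = M := by
    rw [List.map_congr_left hdec, List.map_cons, PySem.List.max?_id_cons, Option.getD_some]
    exact hMg
  -- A's pos_mayor is the first index of the max digit
  have hA2 : (((c0 :: t0).map pvDig).foldl pvStep (-1, 0, 0)).2.1
      = (List.idxOf M ((c0 :: t0).map pvDig) : Int) := by
    rw [pv_L2b _ _ _ _ ⟨pvDig c0, by rw [List.map_cons]; exact List.mem_cons_self .., by omega⟩, hfmax]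
    simp
  -- the character carrying the max digit, and B's find = A's pos
  have hcmem : Nat.digitChar M.toNat ∈ c0 :: t0 := by
    obtain ⟨c, hc, hcM⟩ := List.mem_map.mp hMmem
    have hcd := hdigs c hc
    have hcM' : (c.toNat : Int) - 48 = M := hcM
    have : c = Nat.digitChar M.toNat := by
      apply pv_char_eq_of_toNat
      rw [pv_digitChar_toNat _ (by omega)]
      omega
    rwa [← this]
  have hfind : PySem.Chars.find (c0 :: t0) (PySem.Int.toChars M)
      = (List.idxOf M ((c0 :: t0).map pvDig) : Int) := by
    rw [pv_toChars_small M hMb.1 hMb.2, pv_find_singleton _ _ hcmem]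
    norm_cast
    rw [← pv_idxOf_map (Nat.digitChar M.toNat)
        (by rw [pv_digitChar_toNat _ (by omega)]; omega)
        (by rw [pv_digitChar_toNat _ (by omega)]; omega) (c0 :: t0) hdigs,
      pv_dig_digitChar M hMb.1 hMb.2]
  -- assemble
  rw [hfoldA, pv_L1, hfmax, hmayor, hA2, hfind]

-- ===== VERDICT (by name: the statement is the Claim_ definition above) =====
theorem mejor_spec : Claim_equal_mejor := by
  intro votos _ hpre
  obtain ⟨hv, -⟩ := hpre
  have hdigs := pv_toChars_digits votos hv
  have hne := pv_toChars_ne_nil votos hv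
  obtain ⟨c0, t0, hs0⟩ := List.exists_cons_of_ne_nil hne
  rw [hs0] at hdigs
  show mejor votos = mejor_alt votos
  unfold mejor mejor_alt
  rw [hs0]
  exact pv_main c0 t0 hdigs
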